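-- pv_equiv track=rewrite | github.com/guigui64/advent-of-code | 2016/16.py | solve
-- ===== SOURCE A (Python) =====
-- def checksum(str):
--     cs = ""
--     for i in range(0, len(str), 2):
--         if str[i] == str[i+1]:
--             cs += "1"
--         else:
--             cs += "0"
--     return cs
--
-- def solve(size):
--
--     dragon = "10001001100000001"
--
--     while len(dragon) < size:
--         a = dragon
--         b = a[::-1].replace('1', '#').replace('0', '1').replace('#', '0')
--         dragon = a + "0" + b
--
--     dragon = dragon[:size]
--     cs = checksum(dragon)
--     while len(cs) % 2 == 0:
--         cs = checksum(cs)
--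
--     return cs
-- ===== SOURCE B (Python) =====
-- SEED = "10001001100000001"
--
--
-- def _ones(n):
--     # number of '1' characters among the first n characters of the (infinite) dragon data
--     if n <= 17:
--         return SEED[:n].count('1')
--     L = 17
--     while 2 * L + 1 < n:
--         L = 2 * L + 1
--     t = n - L - 1
--     return t + _ones(L - t)
--
--
-- def solve(size):
--     m = size // 2
--     k = 2
--     while m % 2 == 0:
--         m //= 2
--         k *= 2
--     out = []
--     prev = 0
--     for j in range(1, m + 1):
--         cur = _ones(j * k)
--         out.append('1' if (cur - prev) % 2 == 0 else '0')
--         prev = cur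
--     return ''.join(out)
-- ===== Notes on version B (the rewrite author's own statement) =====
-- stated objective: alternative
-- what changed: B never materialises the dragon string or the repeated checksum passes: it computes the number of 1-bits in any dragon prefix by a closed-form reflection recursion on the dragon structure, extracts the odd part m and block size k = 2^v of size, and emits each of the m output characters directly as the parity of its k-bit block (checksum of a block = NOT of its 1-bit parity).
-- intended difference: On negative sizes (A returns only on odd sizes in (-17,0)) A returns the repeated checksum of a negative-slice truncation of its hard-coded seed, an artefact of Python slicing; B returns the empty string, the natural value for a request of no data. — e.g. on solve(-1): A returns "1", B returns ""
-- outside the precondition, e.g. on solve(1): A raises IndexError, B does not finish within the time limit; on solve(-2): A raises IndexError, B returns ''; on solve(-17): A does not finish within the time limit, B returns ''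
import Mathlib
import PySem

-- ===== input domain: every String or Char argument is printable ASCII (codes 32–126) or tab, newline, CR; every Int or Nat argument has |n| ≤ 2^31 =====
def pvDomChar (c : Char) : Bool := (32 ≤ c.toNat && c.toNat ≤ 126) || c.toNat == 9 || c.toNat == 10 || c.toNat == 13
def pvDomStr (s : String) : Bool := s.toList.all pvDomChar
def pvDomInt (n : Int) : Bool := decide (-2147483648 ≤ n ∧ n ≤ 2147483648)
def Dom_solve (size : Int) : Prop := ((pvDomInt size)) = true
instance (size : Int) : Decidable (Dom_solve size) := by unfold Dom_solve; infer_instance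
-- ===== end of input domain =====

-- B replaces A's dragon-string construction and repeated pairwise-checksum passes by a
-- closed-form prefix-ones recursion on the dragon structure plus one block-parity pass.

-- ===== PORT A =====
-- for i in range(0, len(str), 2): cs += '1' if str[i] == str[i+1] else '0'
-- (the index walk i, i+1, i+2, ... over the string is the walk down the list two cells at a
-- time; cs is kept reversed so that each `cs += c` is O(1), and re-reversed once at the end)
def checksumGo : List Char → List Char → List Char
  | a :: b :: rest, cs => checksumGo rest ((if a == b then '1' else '0') :: cs)
  | _ :: [], cs => cs   -- str[i+1] raises IndexError in Python here (odd length; outside Pre_)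
  | [], cs => cs

def checksum (s : List Char) : List Char := (checksumGo s []).reverse

-- while len(dragon) < size: dragon = a + '0' + inverted reversed a
-- (fuel size.toNat is a totality guard: the length grows every iteration, so it never runs out)
def dragonGrow (size : Int) : Nat → List Char → List Char
  | 0, dragon => dragon
  | fuel+1, dragon =>
    if (dragon.length : Int) < size then
      let a := dragon
      -- a[::-1] ported as a.reverse (Python-exact: PySem.List.slice?_none_none_neg_one;
      -- the generic stepped slice? evaluates quadratically, reverse is linear)
      let b := PySem.Chars.replace (PySem.Chars.replace (PySem.Chars.replace
                a.reverse ['1'] ['#']) ['0'] ['1']) ['#'] ['0']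
      dragonGrow size fuel (a ++ ['0'] ++ b)
    else dragon

-- while len(cs) % 2 == 0: cs = checksum(cs)
-- (fuel: the length halves every iteration; on an empty cs Python loops forever — outside Pre_)
def csLoop : Nat → List Char → List Char
  | 0, cs => cs
  | fuel+1, cs => if cs.length % 2 == 0 then csLoop fuel (checksum cs) else cs

def solve (size : Int) : String :=
  let dragon := dragonGrow size size.toNat "10001001100000001".toList
  let dragon := PySem.List.slice dragon none (some size)
  let cs := checksum dragon
  String.ofList (csLoop cs.length cs)

-- ===== PORT B =====
def SEED : List Char := "10001001100000001".toList

-- while 2*L+1 < n: L = 2*L+1   (L starts at 17 and only grows, so it stays a natural number)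
def onesFindL (n : Int) : Nat → Nat → Nat
  | 0, L => L
  | fuel+1, L => if 2 * (L : Int) + 1 < n then onesFindL n fuel (2 * L + 1) else L

-- _ones(n), with fuel making the recursion structural (the argument shrinks every call)
def onesB : Nat → Int → Int
  | 0, _ => 0      -- fuel exhausted; unreachable from `ones`
  | fuel+1, n =>
    if n ≤ 17 then ((PySem.List.slice SEED none (some n)).count '1' : Int)
    else
      let L : Int := (onesFindL n n.toNat 17 : Nat)
      let t := n - L - 1
      t + onesB fuel (L - t)

def ones (n : Int) : Int := onesB (n.toNat + 1) n

-- while m % 2 == 0: m //= 2; k *= 2   (on m = 0, i.e. size = 0, Python loops forever — outside Pre_)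
def reduceMK : Nat → Int → Int → Int × Int
  | 0, m, k => (m, k)
  | fuel+1, m, k =>
    if PySem.Int.mod m 2 == 0 then reduceMK fuel (PySem.Int.floordiv m 2) (k * 2) else (m, k)

def solve_alt (size : Int) : String :=
  let m0 := PySem.Int.floordiv size 2
  let mk := reduceMK (m0.natAbs + 1) m0 2
  let m := mk.1
  let k := mk.2
  -- out/prev loop; out is kept reversed so each append is O(1), re-reversed at the end
  let st := (PySem.List.pyRange 1 (m + 1) 1).foldl
    (fun (st : List Char × Int) j =>
      let cur := ones (j * k)
      ((if PySem.Int.mod (cur - st.2) 2 == 0 then '1' else '0') :: st.1, cur))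
    ([], 0)
  String.ofList st.1.reverse

-- ===== PRECONDITION & SPEC =====
-- Pre_ excludes the inputs on which A never returns an ordinary value: positive odd sizes and
-- even sizes in (-17, 0) make checksum raise IndexError; size = 0 and size ≤ -17 loop forever.
def Pre_solve (size : Int) : Prop :=
  (2 ≤ size ∧ 2 ∣ size) ∨ (-17 < size ∧ size < 0 ∧ ¬ 2 ∣ size)
instance (size : Int) : Decidable (Pre_solve size) := by unfold Pre_solve; infer_instance
def pvWitness_solve : Int := (4)

-- On negative sizes (A returns only on the odd ones in (-17,0)) A's value is the checksum of a
-- negative-slice truncation of its hard-coded seed — an artefact of Python slicing — while B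
-- returns the empty string, the natural result for a request of no data.
def D_solve (size : Int) : Prop := size < 0
instance (size : Int) : Decidable (D_solve size) := by unfold D_solve; infer_instance
def Spec_solve (size : Int) (out : String) : Prop := ¬ D_solve size → out = solve_alt size
instance (size : Int) (out : String) : Decidable (Spec_solve size out) := by unfold Spec_solve; infer_instance
def pvDiffWitness_solve : Int := (-1)
def pvDiffWitnessOut_solve : String × String := ("1", "")

-- ===== CLAIM (what is proved, stated in full; the proofs are below) =====
def Claim_unchanged_solve : Prop := ∀ (size : Int), Dom_solve size → Pre_solve size → Spec_solve size (solve size)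
def Claim_changed_solve : Prop := Dom_solve (pvDiffWitness_solve) ∧ Pre_solve (pvDiffWitness_solve) ∧ D_solve (pvDiffWitness_solve) ∧ solve (pvDiffWitness_solve) = pvDiffWitnessOut_solve.1 ∧ solve_alt (pvDiffWitness_solve) = pvDiffWitnessOut_solve.2 ∧ pvDiffWitnessOut_solve.1 ≠ pvDiffWitnessOut_solve.2
def Claim_exact_solve : Prop := ∀ (size : Int), Dom_solve size → Pre_solve size → D_solve size → solve size ≠ solve_alt size

-- ===== LEMMAS AND PROOFS =====

def chrB (b : Bool) : Char := if b then '1' else '0'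

def mchr (l : List Bool) : List Char := l.map chrB

def seedB : List Bool :=
  [true, false, false, false, true, false, false, true, true,
   false, false, false, false, false, false, false, true]

def dstep (l : List Bool) : List Bool := l ++ [false] ++ (l.reverse.map (fun b => !b))

def dit (j : Nat) : List Bool := dstep^[j] seedB

def cpairs : List Char → List Char
  | a :: b :: r => (if a == b then '1' else '0') :: cpairs r
  | _ => []

def bpairs : List Bool → List Bool
  | a :: b :: r => (a == b) :: bpairs r
  | _ => []

def par (l : List Bool) : Bool := l.foldr (fun a b => xor a b) false

theorem go_single (c d : Char) : ∀ (fuel : Nat) (l acc : List Char), l.length ≤ fuel →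
    PySem.Chars.replace.go [c] [d] fuel l acc = acc.reverse ++ l.map (fun x => if x = c then d else x) := by
  intro fuel
  induction fuel with
  | zero => intro l acc h; simp at h; simp [h, PySem.Chars.replace.go]
  | succ n ih =>
    intro l acc h
    cases l with
    | nil => simp [PySem.Chars.replace.go]
    | cons a t =>
      simp only [PySem.Chars.replace.go]
      by_cases hac : a = c
      · simp [List.isPrefixOf, hac, ih t _ (by simpa using h)]
      · have hca : ¬ c = a := fun hh => hac hh.symm
        simp [List.isPrefixOf, hac, hca, ih t _ (by simpa using h)]

theorem replace_single (c d : Char) (s : List Char) :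
    PySem.Chars.replace s [c] [d] = s.map (fun x => if x = c then d else x) := by
  simp [PySem.Chars.replace, go_single c d s.length s [] le_rfl]

theorem trick_eq (l : List Bool) :
    PySem.Chars.replace (PySem.Chars.replace (PySem.Chars.replace
      ((mchr l).reverse) ['1'] ['#']) ['0'] ['1']) ['#'] ['0'] = mchr (l.reverse.map (fun b => !b)) := by
  simp only [replace_single]
  have h1 : (mchr l).reverse = mchr l.reverse := by simp [mchr]
  rw [h1]
  simp only [mchr, List.map_map]
  apply List.map_congr_left
  intro b _
  cases b <;> rfl

theorem count_mchr (l : List Bool) : (mchr l).count '1' = l.count true := by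
  induction l with
  | nil => rfl
  | cons a t ih => cases a <;> simp [mchr, chrB, ih] at *

theorem cpairs_mchr : ∀ (l : List Bool), cpairs (mchr l) = mchr (bpairs l) := by
  intro l
  induction l using bpairs.induct with
  | case1 a b r ih =>
    have h : (chrB a == chrB b) = (a == b) := by cases a <;> cases b <;> rfl
    simp only [mchr, List.map_cons] at ih ⊢
    rw [cpairs, bpairs]
    simp only [h, List.map_cons, ih]
    cases a <;> cases b <;> rfl
  | case2 t h =>
    cases t with
    | nil => rfl
    | cons a t' =>
      cases t' with
      | nil => rfl
      | cons b r => exact ((h a b r rfl).elim)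

theorem bpairs_length : ∀ (l : List Bool), (bpairs l).length = l.length / 2 := by
  intro l
  induction l using bpairs.induct with
  | case1 a b r ih => rw [bpairs]; simp [ih]; omega
  | case2 t h =>
    cases t with
    | nil => rfl
    | cons a t' =>
      cases t' with
      | nil => simp [bpairs]
      | cons b r => exact ((h a b r rfl).elim)

theorem bpairs_append : ∀ (x y : List Bool), x.length % 2 = 0 →
    bpairs (x ++ y) = bpairs x ++ bpairs y := by
  intro x
  induction x using bpairs.induct with
  | case1 a b r ih =>
    intro y h
    simp only [List.cons_append]
    rw [bpairs, bpairs]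
    simp only [List.length_cons] at h
    simp [ih y (by omega)]
  | case2 t h =>
    cases t with
    | nil => intro y _; simp [bpairs]
    | cons a t' =>
      cases t' with
      | nil => intro y hy; simp at hy
      | cons b r => exact ((h a b r rfl).elim)

theorem par_cons (a : Bool) (l : List Bool) : par (a :: l) = xor a (par l) := rfl

theorem par_eq_count (l : List Bool) : par l = ((l.count true) % 2 == 1) := by
  induction l with
  | nil => rfl
  | cons a t ih =>
    rw [par_cons, ih]
    cases a <;> simp [List.count_cons] <;>
      rcases Nat.mod_two_eq_zero_or_one (t.count true) with h | h <;> simp [Nat.add_mod, h]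

theorem par_bpairs_even : ∀ (l : List Bool), l.length % 2 = 0 →
    par (bpairs l) = xor (decide ((l.length / 2) % 2 = 1)) (par l) := by
  intro l
  induction l using bpairs.induct with
  | case1 a b r ih =>
    intro h
    simp only [List.length_cons] at h
    rw [bpairs, par_cons, ih (by omega), par_cons, par_cons]
    have hlen : ((a :: b :: r : List Bool).length / 2) % 2 = 1 ↔ ¬ ((r.length / 2) % 2 = 1) := by
      simp only [List.length_cons]; omega
    rcases Nat.mod_two_eq_zero_or_one (r.length / 2) with hr | hr
    · have h1 : (((a :: b :: r : List Bool).length / 2) % 2 = 1) := by simp only [List.length_cons]; omega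
      simp only [hr, h1, decide_eq_true_eq]
      cases a <;> cases b <;> cases par r <;> simp
    · have h1 : ¬(((a :: b :: r : List Bool).length / 2) % 2 = 1) := by simp only [List.length_cons]; omega
      simp only [hr, decide_eq_true_eq, h1]
      cases a <;> cases b <;> cases par r <;> simp
  | case2 t h =>
    cases t with
    | nil => intro _; simp [bpairs, par]
    | cons a t' =>
      cases t' with
      | nil => intro hy; simp at hy
      | cons b r => exact ((h a b r rfl).elim)

theorem par_bpairs (l : List Bool) (h : l.length % 4 = 0) : par (bpairs l) = par l := by
  rw [par_bpairs_even l (by omega)]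
  have : ¬ ((l.length / 2) % 2 = 1) := by omega
  simp [this]

theorem bpairs_nil_iterate (v : Nat) : bpairs^[v] [] = [] :=
  Function.iterate_fixed rfl v

theorem block_iterate : ∀ (v : Nat), 1 ≤ v → ∀ (bs : List Bool), bs.length = 2 ^ v →
    bpairs^[v] bs = [!(par bs)] := by
  intro v
  induction v with
  | zero => omega
  | succ u ih =>
    intro _ bs hlen
    by_cases hu : u = 0
    · subst hu
      match bs, hlen with
      | [a, b], _ => cases a <;> cases b <;> rfl
    · rw [Function.iterate_succ_apply]
      have h4 : bs.length % 4 = 0 := by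
        rw [hlen]
        have : 2 ^ (u+1) = 4 * 2 ^ (u-1) := by
          rw [show u + 1 = (u-1) + 2 by omega, pow_add]; ring
        omega
      rw [ih (by omega) (bpairs bs) (by rw [bpairs_length, hlen]; omega),
          par_bpairs bs h4]

theorem bpairs_iterate_append : ∀ (v : Nat) (x y : List Bool), 2 ^ v ∣ x.length →
    bpairs^[v] (x ++ y) = bpairs^[v] x ++ bpairs^[v] y := by
  intro v
  induction v with
  | zero => intro x y _; rfl
  | succ u ih =>
    intro x y hdvd
    obtain ⟨c, hc⟩ := hdvd
    have hc2 : x.length = 2 * (2 ^ u * c) := by rw [hc, pow_succ]; ring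
    rw [Function.iterate_succ_apply, Function.iterate_succ_apply,
        Function.iterate_succ_apply, bpairs_append x y (by omega)]
    apply ih
    rw [bpairs_length]
    exact ⟨c, by omega⟩

theorem blocks_iterate (v : Nat) (hv : 1 ≤ v) : ∀ (m : Nat) (l : List Bool), l.length = m * 2 ^ v →
    bpairs^[v] l = (List.range m).map (fun j => !(par ((l.drop (j * 2 ^ v)).take (2 ^ v)))) := by
  intro m
  induction m with
  | zero =>
    intro l hl
    simp at hl
    simp [hl, bpairs_nil_iterate]
  | succ m ih =>
    intro l hl
    have hle : 2 ^ v ≤ l.length := by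
      rw [hl]; exact Nat.le_mul_of_pos_left (2 ^ v) (by omega)
    have hxlen : (l.take (2 ^ v)).length = 2 ^ v := by
      rw [List.length_take]; omega
    have hsplit : l = l.take (2 ^ v) ++ l.drop (2 ^ v) := (List.take_append_drop _ l).symm
    have hylen : (l.drop (2 ^ v)).length = m * 2 ^ v := by
      rw [List.length_drop, hl]; rw [Nat.succ_mul]; omega
    conv_lhs => rw [hsplit]
    rw [bpairs_iterate_append v _ _ (by rw [hxlen]),
        block_iterate v hv _ hxlen, ih (l.drop (2 ^ v)) hylen]
    rw [List.range_succ_eq_map]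
    simp only [List.map_cons, List.map_map, List.drop_zero]
    refine List.cons_eq_cons.mpr ⟨by simp, ?_⟩
    apply List.map_congr_left
    intro j _
    simp only [Function.comp_apply]
    rw [List.drop_drop, show 2 ^ v + j * 2 ^ v = (j + 1) * 2 ^ v from by ring]

theorem checksumGo_eq : ∀ (s cs : List Char), checksumGo s cs = (cpairs s).reverse ++ cs
  | a :: b :: rest, cs => by
    rw [checksumGo, cpairs, checksumGo_eq rest]
    simp
  | [a], cs => by
    rw [checksumGo]
    simp [cpairs]
  | [], cs => by
    rw [checksumGo]
    simp [cpairs]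

theorem checksum_eq_cpairs (s : List Char) : checksum s = cpairs s := by
  rw [checksum, checksumGo_eq]
  simp

theorem checksum_mchr (l : List Bool) : checksum (mchr l) = mchr (bpairs l) := by
  rw [checksum_eq_cpairs, cpairs_mchr]

theorem mchr_length (l : List Bool) : (mchr l).length = l.length := by simp [mchr]

theorem csLoop_iterate : ∀ (u : Nat), ∀ (fuel : Nat) (m' : Nat) (l : List Bool), m' % 2 = 1 →
    l.length = m' * 2 ^ u → l.length ≤ fuel → csLoop fuel (mchr l) = mchr (bpairs^[u] l) := by
  intro u
  induction u with
  | zero =>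
    intro fuel m' l hm hl _
    simp only [pow_zero, mul_one] at hl
    have hodd : l.length % 2 = 1 := by omega
    cases fuel with
    | zero => rfl
    | succ f =>
      rw [csLoop]
      simp [mchr_length, hodd]
  | succ u ih =>
    intro fuel m' l hm hl hfuel
    have hp : 0 < 2 ^ (u+1) := by positivity
    have hlen2 : l.length = 2 * (m' * 2 ^ u) := by rw [hl, pow_succ]; ring
    have hpos : 0 < l.length := by
      rw [hl]; exact Nat.mul_pos (by omega) hp
    cases fuel with
    | zero => omega
    | succ f =>
      rw [csLoop]
      have heven : (l.length % 2 == 0) = true := by simp; omega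
      simp only [mchr_length, heven, if_true]
      rw [checksum_mchr]
      rw [ih f m' (bpairs l) hm (by rw [bpairs_length]; omega) (by rw [bpairs_length]; omega)]
      rw [Function.iterate_succ_apply]

theorem mchr_append (x y : List Bool) : mchr (x ++ y) = mchr x ++ mchr y := by simp [mchr]

theorem seed_eq : "10001001100000001".toList = mchr seedB := by decide

theorem dstep_length (l : List Bool) : (dstep l).length = 2 * l.length + 1 := by
  simp [dstep]; omega

theorem dragonGrow_eq (size : Int) : ∀ (fuel : Nat) (l : List Bool), size ≤ (l.length : Int) + fuel →
    ∃ m : Nat, dragonGrow size fuel (mchr l) = mchr (dstep^[m] l) ∧ size ≤ ((dstep^[m] l).length : Int) := by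
  intro fuel
  induction fuel with
  | zero =>
    intro l h
    exact ⟨0, rfl, by simpa using h⟩
  | succ fuel ih =>
    intro l h
    rw [dragonGrow]
    by_cases hlt : ((mchr l).length : Int) < size
    · simp only [hlt, if_pos]
      rw [trick_eq]
      have hstep : mchr l ++ ['0'] ++ mchr (l.reverse.map (fun b => !b)) = mchr (dstep l) := by
        rw [dstep, mchr_append, mchr_append]; rfl
      rw [hstep]
      obtain ⟨m, hm, hlen⟩ := ih (dstep l) (by rw [dstep_length]; rw [mchr_length] at hlt; push_cast; push_cast at h; omega)
      exact ⟨m + 1, by rw [hm, Function.iterate_succ_apply], by rw [Function.iterate_succ_apply]; exact hlen⟩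
    · simp only [hlt, if_neg, reduceIte]
      exact ⟨0, rfl, by rw [mchr_length] at hlt; simpa using hlt⟩

theorem dit_succ (i : Nat) : dit (i+1) = dstep (dit i) := by
  simp [dit, Function.iterate_succ_apply']

theorem dit_len_succ (i : Nat) : (dit (i+1)).length = 2 * (dit i).length + 1 := by
  rw [dit_succ, dstep_length]

theorem dit_prefix (i : Nat) : ∀ j, i ≤ j → (dit i) <+: (dit j) := by
  intro j
  induction j with
  | zero => intro h; rw [Nat.le_zero.mp h]
  | succ j ihj =>
    intro h
    rcases Nat.lt_or_ge i (j+1) with hlt | hge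
    · have := ihj (by omega)
      refine this.trans ?_
      rw [dit_succ, dstep]
      exact ⟨[false] ++ ((dit j).reverse.map (fun b => !b)), by simp⟩
    · rw [Nat.le_antisymm h hge]

theorem dit_take_eq (i j n : Nat) (hi : n ≤ (dit i).length) (hj : n ≤ (dit j).length) :
    (dit i).take n = (dit j).take n := by
  rcases Nat.le_total i j with h | h
  · obtain ⟨t, ht⟩ := dit_prefix i j h
    rw [← ht, List.take_append_of_le_length hi]
  · obtain ⟨t, ht⟩ := dit_prefix j i h
    rw [← ht, List.take_append_of_le_length hj]

theorem onesFindL_spec (n : Int) : ∀ (fuel : Nat) (i : Nat),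
    ((dit i).length : Int) < n → (n - (dit i).length).toNat ≤ fuel →
    ∃ i', onesFindL n fuel (dit i).length = (dit i').length ∧
      ((dit i').length : Int) < n ∧ n ≤ 2 * ((dit i').length : Int) + 1 := by
  intro fuel
  induction fuel with
  | zero =>
    intro i hlt hf
    omega
  | succ fuel ih =>
    intro i hlt hf
    rw [onesFindL]
    by_cases hc : 2 * ((dit i).length : Int) + 1 < n
    · simp only [hc, if_pos]
      have harg : 2 * (dit i).length + 1 = (dit (i+1)).length := (dit_len_succ i).symm
      rw [harg]
      exact ih (i+1) (by rw [dit_len_succ]; push_cast; omega) (by rw [dit_len_succ]; omega)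
    · simp only [hc, if_neg, reduceIte]
      exact ⟨i, rfl, hlt, by omega⟩

theorem reduceMK_spec : ∀ (fuel : Nat) (m k : Int), 0 < m → m.natAbs ≤ fuel →
    ∃ (u : Nat) (m' : Int), reduceMK fuel m k = (m', k * 2 ^ u) ∧ m = m' * 2 ^ u ∧ ¬ (2 ∣ m') ∧ 0 < m' := by
  intro fuel
  induction fuel with
  | zero => intro m k hm hf; omega
  | succ fuel ih =>
    intro m k hm hf
    rw [reduceMK]
    have hmod : PySem.Int.mod m 2 = m % 2 := PySem.Int.mod_eq_emod_of_pos (by norm_num)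
    by_cases he : 2 ∣ m
    · have hc : (PySem.Int.mod m 2 == 0) = true := by
        simp [hmod, Int.emod_emod_of_dvd]
        omega
      simp only [hc, if_true]
      have hfd : PySem.Int.floordiv m 2 = m / 2 := PySem.Int.floordiv_eq_ediv_of_pos (by norm_num)
      rw [hfd]
      obtain ⟨u, m', heq, hsum, hnd, hpos⟩ := ih (m / 2) (k * 2) (by omega) (by omega)
      have hrg : m' * 2 ^ (u + 1) = 2 * (m' * 2 ^ u) := by ring
      refine ⟨u + 1, m', ?_, by omega, hnd, hpos⟩
      rw [heq]
      congr 1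
      rw [pow_succ]
      ring
    · have hc : (PySem.Int.mod m 2 == 0) = false := by
        simp [hmod]
        omega
      simp only [hc, Bool.false_eq_true, if_false]
      exact ⟨0, m, by simp, by simp, he, hm⟩

theorem count_not (x : List Bool) : (x.map (fun b => !b)).count true = x.count false := by
  induction x with
  | nil => rfl
  | cons a t ih => cases a <;> simp [ih]

theorem count_parts (x : List Bool) : x.count true + x.count false = x.length := by
  induction x with
  | nil => rfl
  | cons a t ih => cases a <;> simp [List.count_cons, ih] <;> omega

theorem dit_zero_len : (dit 0).length = 17 := by decide

theorem ones_correct : ∀ (fuel : Nat) (n j : Nat), n ≤ (dit j).length → n < fuel →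
    onesB fuel (n : Int) = (((dit j).take n).count true : Int) := by
  intro fuel
  induction fuel with
  | zero => intro n j _ h; omega
  | succ fuel ih =>
    intro n j hn hf
    rw [onesB]
    by_cases h17 : (n : Int) ≤ 17
    · have hn17 : n ≤ 17 := by exact_mod_cast h17
      simp only [h17, if_pos]
      rw [PySem.List.slice_to_natCast SEED n]
      have hS : SEED = mchr seedB := seed_eq
      rw [hS, show (mchr seedB).take n = mchr (seedB.take n) from (List.map_take ..).symm, count_mchr]
      rw [dit_take_eq j 0 n hn (by rw [dit_zero_len]; exact hn17)]
      rfl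
    · simp only [h17, if_neg, reduceIte]
      have hn18 : 18 ≤ n := by omega
      have htn : ((n : Int)).toNat = n := by simp
      rw [htn, show (17 : Nat) = (dit 0).length from dit_zero_len.symm]
      obtain ⟨i', hL, hlt, hle⟩ := onesFindL_spec (n : Int) n 0
        (by rw [dit_zero_len]; push_cast; omega)
        (by rw [dit_zero_len]; omega)
      rw [hL]
      obtain ⟨Lnat, hLeq⟩ : ∃ L, (dit i').length = L := ⟨_, rfl⟩
      rw [hLeq] at hlt hle ⊢
      have hLltn : Lnat < n := by exact_mod_cast hlt
      have hnle : n ≤ 2 * Lnat + 1 := by exact_mod_cast hle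
      have harg : (Lnat : Int) - ((n : Int) - (Lnat : Int) - 1) = ((Lnat - (n - Lnat - 1) : Nat) : Int) := by
        push_cast; omega
      rw [harg]
      have hrnle : Lnat - (n - Lnat - 1) ≤ (dit i').length := by omega
      have hrnf : Lnat - (n - Lnat - 1) < fuel := by omega
      rw [ih (Lnat - (n - Lnat - 1)) i' hrnle hrnf]
      -- right-hand side: move to level i' + 1 and split the dragon step
      have hlen1 : (dit (i'+1)).length = 2 * Lnat + 1 := by rw [dit_len_succ, hLeq]
      rw [dit_take_eq j (i'+1) n hn (by omega)]
      rw [dit_succ, dstep]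
      have hsplit : ((dit i') ++ [false] ++ ((dit i').reverse.map (fun b => !b))).take n =
          ((dit i') ++ [false]) ++ ((dit i').reverse.map (fun b => !b)).take (n - Lnat - 1) := by
        have hlen2 : ((dit i') ++ [false]).length = Lnat + 1 := by simp [hLeq]
        have h := List.take_length_add_append (l₁ := (dit i') ++ [false])
          (l₂ := (dit i').reverse.map (fun b => !b)) (n - Lnat - 1)
        rw [hlen2, show Lnat + 1 + (n - Lnat - 1) = n from by omega] at h
        exact h
      rw [hsplit]
      have hMt : ((dit i').reverse.map (fun b => !b)).take (n - Lnat - 1) =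
          (((dit i').drop (Lnat - (n - Lnat - 1))).reverse).map (fun b => !b) := by
        rw [← List.map_take, List.take_reverse, hLeq]
      have hdroplen : ((dit i').drop (Lnat - (n - Lnat - 1))).length = n - Lnat - 1 := by
        rw [List.length_drop, hLeq]; omega
      have hcntM : ((((dit i').reverse.map (fun b => !b))).take (n - Lnat - 1)).count true =
          (n - Lnat - 1) - ((dit i').drop (Lnat - (n - Lnat - 1))).count true := by
        rw [hMt, count_not]
        have h1 := count_parts ((dit i').drop (Lnat - (n - Lnat - 1)))
        simp only [List.count_reverse]
        omega
      have hcntD : (dit i').count true =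
          ((dit i').take (Lnat - (n - Lnat - 1))).count true +
          ((dit i').drop (Lnat - (n - Lnat - 1))).count true := by
        conv_lhs => rw [← List.take_append_drop (Lnat - (n - Lnat - 1)) (dit i')]
        rw [List.count_append]
      have hdropbound : ((dit i').drop (Lnat - (n - Lnat - 1))).count true ≤ n - Lnat - 1 := by
        have := List.count_le_length (l := (dit i').drop (Lnat - (n - Lnat - 1))) (a := true)
        omega
      rw [List.count_append, List.count_append]
      rw [hcntM]
      have hone : ([false] : List Bool).count true = 0 := rfl
      rw [hone]
      omega

theorem ones_nat (nn j : Nat) (h : nn ≤ (dit j).length) :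
    ones (nn : Int) = (((dit j).take nn).count true : Int) := by
  unfold ones
  rw [show ((nn : Int)).toNat = nn from by simp]
  exact ones_correct (nn + 1) nn j h (by omega)

theorem foldB (k : Int) : ∀ (mn : Nat),
    (PySem.List.pyRange 1 ((mn : Int) + 1) 1).foldl
      (fun (st : List Char × Int) j =>
        ((if PySem.Int.mod (ones (j * k) - st.2) 2 == 0 then '1' else '0') :: st.1, ones (j * k)))
      ([], 0)
    = (((List.range mn).map
        (fun (j : Nat) => if PySem.Int.mod (ones (((j : Int) + 1) * k) - ones ((j : Int) * k)) 2 == 0 then '1' else '0')).reverse,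
       ones ((mn : Int) * k)) := by
  intro mn
  induction mn with
  | zero =>
    have h0 : PySem.List.pyRange 1 ((0 : Int) + 1) 1 = [] := by decide
    rw [show ((0:Nat) : Int) = (0 : Int) from rfl, h0]
    simp
    decide
  | succ mn ih =>
    have hstep : PySem.List.pyRange 1 (((mn + 1 : Nat) : Int) + 1) 1 =
        PySem.List.pyRange 1 ((mn : Int) + 1) 1 ++ [(mn : Int) + 1] := by
      push_cast
      exact PySem.List.pyRange_one_succ_right (by omega)
    rw [hstep, List.foldl_append, ih]
    simp only [List.foldl_cons, List.foldl_nil, List.range_succ, List.map_append,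
      List.map_cons, List.map_nil, List.reverse_append, List.reverse_cons, List.reverse_nil,
      List.nil_append, List.cons_append, List.singleton_append]
    have hc : ((mn + 1 : Nat) : Int) = (mn : Int) + 1 := by push_cast; ring
    rw [hc]

theorem main_even (size : Int) (h2 : 2 ≤ size) (hdvd : 2 ∣ size) : solve size = solve_alt size := by
  have hm0 : PySem.Int.floordiv size 2 = size / 2 := PySem.Int.floordiv_eq_ediv_of_pos (by norm_num)
  have hm0pos : 0 < size / 2 := by omega
  obtain ⟨u, m', hred, hfact, hodd, hpos⟩ :=
    reduceMK_spec ((size / 2).natAbs + 1) (size / 2) 2 hm0pos (by omega)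
  obtain ⟨mn, hmn⟩ : ∃ mn : Nat, m' = (mn : Int) := ⟨m'.toNat, by omega⟩
  have hmnodd : mn % 2 = 1 := by
    rcases Nat.mod_two_eq_zero_or_one mn with h | h
    · exfalso; apply hodd; rw [hmn]; exact ⟨((mn / 2 : Nat) : Int), by push_cast; omega⟩
    · exact h
  have hmnpos : 0 < mn := by omega
  have hk2 : (2 : Int) * 2 ^ u = 2 ^ (u + 1) := by rw [pow_succ]; ring
  have hsize : size = (mn : Int) * 2 ^ (u + 1) := by
    have h1 : size = 2 * (size / 2) := by omega
    rw [h1, hfact, hmn, pow_succ]; ring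
  have hNsize : ((size.toNat : Nat) : Int) = size := by omega
  have hNfact : size.toNat = mn * 2 ^ (u + 1) := by
    have hc : ((size.toNat : Nat) : Int) = ((mn * 2 ^ (u + 1) : Nat) : Int) := by
      rw [hNsize, hsize]; push_cast; ring
    exact_mod_cast hc
  -- ===== A side =====
  unfold solve
  dsimp only
  rw [seed_eq]
  obtain ⟨J, hDG, hJlen⟩ := dragonGrow_eq size size.toNat seedB
    (by have hsl : ((seedB.length : Nat) : Int) = 17 := by decide
        omega)
  rw [hDG]
  have hditJ : dstep^[J] seedB = dit J := rfl
  rw [hditJ] at hDG hJlen ⊢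
  have hNJ : size.toNat ≤ (dit J).length := by omega
  rw [show PySem.List.slice (mchr (dit J)) none (some size) = (mchr (dit J)).take size.toNat from
    PySem.List.slice_to _ (by omega)]
  rw [show (mchr (dit J)).take size.toNat = mchr ((dit J).take size.toNat) from
    (List.map_take ..).symm]
  have hXlen : ((dit J).take size.toNat).length = size.toNat := by
    rw [List.length_take]; omega
  rw [checksum_mchr]
  have hNv : size.toNat = 2 * (mn * 2 ^ u) := by rw [hNfact, pow_succ]; ring
  rw [csLoop_iterate u _ mn (bpairs ((dit J).take size.toNat)) hmnodd
       (by rw [bpairs_length, hXlen]; omega)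
       (by rw [mchr_length])]
  rw [← Function.iterate_succ_apply]
  rw [blocks_iterate (u + 1) (by omega) mn ((dit J).take size.toNat) (by rw [hXlen, hNfact])]
  -- ===== B side =====
  unfold solve_alt
  dsimp only
  rw [hm0, hred, hmn, hk2]
  rw [foldB (2 ^ (u + 1)) mn]
  rw [List.reverse_reverse]
  -- ===== pointwise =====
  simp only [mchr, List.map_map]
  congr 1
  apply List.map_congr_left
  intro j hj
  simp only [Function.comp_apply]
  have hjm : j < mn := List.mem_range.mp hj
  have hj1 : (j + 1) * 2 ^ (u + 1) ≤ size.toNat := by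
    rw [hNfact]
    exact Nat.mul_le_mul_right _ (by omega)
  have hj0 : j * 2 ^ (u + 1) ≤ size.toNat := by
    rw [hNfact]
    exact Nat.mul_le_mul_right _ (by omega)
  -- the two prefix counts
  have ho1 : ones (((j : Int) + 1) * 2 ^ (u + 1)) =
      (((dit J).take ((j + 1) * 2 ^ (u + 1))).count true : Int) := by
    have hcast : ((j : Int) + 1) * 2 ^ (u + 1) = (((j + 1) * 2 ^ (u + 1) : Nat) : Int) := by
      push_cast; ring
    rw [hcast, ones_nat _ J (le_trans hj1 hNJ)]
  have ho0 : ones ((j : Int) * 2 ^ (u + 1)) =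
      (((dit J).take (j * 2 ^ (u + 1))).count true : Int) := by
    have hcast : (j : Int) * 2 ^ (u + 1) = ((j * 2 ^ (u + 1) : Nat) : Int) := by
      push_cast; ring
    rw [hcast, ones_nat _ J (le_trans hj0 hNJ)]
  have hsplitc : ((dit J).take ((j + 1) * 2 ^ (u + 1))).count true =
      ((dit J).take (j * 2 ^ (u + 1))).count true +
      (((dit J).drop (j * 2 ^ (u + 1))).take (2 ^ (u + 1))).count true := by
    rw [show (j + 1) * 2 ^ (u + 1) = j * 2 ^ (u + 1) + 2 ^ (u + 1) from by ring,
        List.take_add, List.count_append]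
  have hstep1 : j * 2 ^ (u + 1) + 2 ^ (u + 1) ≤ size.toNat := by
    have h := hj1
    rw [show (j + 1) * 2 ^ (u + 1) = j * 2 ^ (u + 1) + 2 ^ (u + 1) from by ring] at h
    exact h
  have hblock : (((dit J).take size.toNat).drop (j * 2 ^ (u + 1))).take (2 ^ (u + 1)) =
      ((dit J).drop (j * 2 ^ (u + 1))).take (2 ^ (u + 1)) := by
    rw [List.drop_take, List.take_take]
    congr 1
    omega
  rw [hblock, ho1, ho0, hsplitc]
  push_cast
  have hcnteq : ((((dit J).take (j * 2 ^ (u + 1))).count true : Int) +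
      ((((dit J).drop (j * 2 ^ (u + 1))).take (2 ^ (u + 1))).count true : Int)) -
      (((dit J).take (j * 2 ^ (u + 1))).count true : Int) =
      ((((dit J).drop (j * 2 ^ (u + 1))).take (2 ^ (u + 1))).count true : Int) := by ring
  rw [hcnteq]
  have hm2 : PySem.Int.mod (((((dit J).drop (j * 2 ^ (u + 1))).take (2 ^ (u + 1))).count true : Nat) : Int) 2 =
      ((((((dit J).drop (j * 2 ^ (u + 1))).take (2 ^ (u + 1))).count true % 2 : Nat)) : Int) := by
    exact_mod_cast PySem.Int.mod_natCast _ 2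
  rw [hm2, par_eq_count]
  rcases Nat.mod_two_eq_zero_or_one ((((dit J).drop (j * 2 ^ (u + 1))).take (2 ^ (u + 1))).count true) with hpar | hpar <;>
    simp [hpar, chrB]

-- ===== VERDICT (by name: the statement is the Claim_ definition above) =====
theorem solve_spec : Claim_unchanged_solve := by
  intro size _ hpre hnd
  rcases hpre with ⟨h2, hdvd⟩ | ⟨_, hneg, _⟩
  · exact main_even size h2 hdvd
  · exact absurd hneg hnd

theorem solve_changed : Claim_changed_solve := by unfold Claim_changed_solve; decide

theorem solve_tight : Claim_exact_solve := by
  intro size _ hpre hd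
  unfold Pre_solve at hpre
  unfold D_solve at hd
  have : size = -1 ∨ size = -3 ∨ size = -5 ∨ size = -7 ∨ size = -9 ∨ size = -11 ∨ size = -13 ∨ size = -15 := by
    omega
  rcases this with rfl | rfl | rfl | rfl | rfl | rfl | rfl | rfl <;> decide
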